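-- pv_equiv track=rewrite | github.com/sligter/LambChat | src/infra/session/search_index.py | _truncate_terms
-- ===== SOURCE A (Python) =====
-- MAX_SESSION_SEARCH_TERMS = 4096
--
-- def _truncate_terms(terms: list[str]) -> list[str]:
--     deduped: list[str] = []
--     seen: set[str] = set()
--     for term in terms:
--         clean = term.strip().lower()
--         if not clean or clean in seen:
--             continue
--         seen.add(clean)
--         deduped.append(clean)
--         if len(deduped) >= MAX_SESSION_SEARCH_TERMS:
--             break
--     return deduped
-- ===== SOURCE B (Python) =====
-- MAX_SESSION_SEARCH_TERMS = 4096
--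
-- def _truncate_terms(terms: list[str]) -> list[str]:
--     # Stage 1: clean every term.
--     cleaned = [t.strip().lower() for t in terms]
--     # Stage 2: record the first occurrence index of each non-empty cleaned term.
--     first: dict[str, int] = {}
--     for i, c in enumerate(cleaned):
--         if c:
--             first.setdefault(c, i)
--     # Stage 3: keep a term exactly at its first occurrence, then cap.
--     keep = [c for i, c in enumerate(cleaned) if c and first.get(c) == i]
--     return keep[:MAX_SESSION_SEARCH_TERMS]
-- ===== Notes on version B (the rewrite author's own statement) =====
-- stated objective: alternative
-- what changed: Replaces A's single interleaved loop (seen set, per-element membership test, append, early break) with a first-occurrence-index strategy: one pass records each cleaned term's first index in a dict via setdefault, a second pass keeps a term exactly when its index equals that recorded first occurrence, and a final slice caps the result; no result list or seen set is maintained while scanning.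
import Mathlib
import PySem

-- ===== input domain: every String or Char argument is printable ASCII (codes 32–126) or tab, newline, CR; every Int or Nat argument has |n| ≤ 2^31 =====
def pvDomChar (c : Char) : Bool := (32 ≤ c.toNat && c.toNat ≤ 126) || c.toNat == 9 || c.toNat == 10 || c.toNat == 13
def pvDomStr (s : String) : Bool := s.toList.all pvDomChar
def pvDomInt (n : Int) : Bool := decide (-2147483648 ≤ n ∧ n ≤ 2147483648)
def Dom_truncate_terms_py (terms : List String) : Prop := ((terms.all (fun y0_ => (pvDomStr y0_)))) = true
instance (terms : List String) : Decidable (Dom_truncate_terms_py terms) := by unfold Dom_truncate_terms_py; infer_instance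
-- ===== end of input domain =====

-- B replaces A's interleaved seen-set loop (membership test, append, early break) by a
-- first-occurrence-index strategy: clean all terms, record each cleaned term's first index
-- in a dict (setdefault), keep a term exactly at its recorded first index, slice-cap (alternative; same cost).

-- ===== PORT A =====
-- loop with 'continue'/'break' ported as structural recursion over the remaining terms with the same state (seen, deduped)
def truncateTermsLoop (terms : List String) (seen : PySem.Set String) (deduped : List String) : List String :=
  match terms with
  | [] => deduped
  | term :: rest =>
    let clean := PySem.Str.lower (PySem.Str.strip term)
    if clean == "" || seen.contains clean then
      truncateTermsLoop rest seen deduped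
    else
      let seen' := seen.add clean
      let deduped' := deduped ++ [clean]
      if 4096 ≤ deduped'.length then deduped'
      else truncateTermsLoop rest seen' deduped'

def truncate_terms_py (terms : List String) : List String :=
  truncateTermsLoop terms PySem.Set.empty []

-- ===== PORT B =====
-- the 'first.setdefault' loop of Source B, generalised over the start dict and start index (the port runs it from empty, 0)
def buildFirst (d : PySem.Dict String Int) (l : List String) (n : Int) : PySem.Dict String Int :=
  (PySem.List.enumerate l n).foldl (fun d p => if p.2 == "" then d else d.setdefault p.2 p.1) d

def truncate_terms_py_alt (terms : List String) : List String :=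
  let cleaned := terms.map (fun t => PySem.Str.lower (PySem.Str.strip t))
  let first := buildFirst PySem.Dict.empty cleaned 0
  let keep := ((PySem.List.enumerate cleaned 0).filter
      (fun p => !(p.2 == "") && (first.get? p.2 == some p.1))).map (fun p => p.2)
  PySem.List.slice keep none (some 4096)

-- ===== PRECONDITION & SPEC =====
def Spec_truncate_terms_py (terms : List String) (out : List String) : Prop := out = truncate_terms_py_alt terms
instance (terms : List String) (out : List String) : Decidable (Spec_truncate_terms_py terms out) := by unfold Spec_truncate_terms_py; infer_instance

-- ===== CLAIM (what is proved, stated in full; the proofs are below) =====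
def Claim_equal_truncate_terms_py : Prop := ∀ (terms : List String), Dom_truncate_terms_py terms → Spec_truncate_terms_py terms (truncate_terms_py terms)

-- ===== LEMMAS AND PROOFS =====

-- accumulator form of Set.ofList: elements already in acc are skipped, the rest dedup after acc
theorem foldl_add_split {α : Type} [BEq α] [LawfulBEq α] (xs acc : List α) :
    List.foldl PySem.Set.add acc xs
      = acc ++ List.foldl PySem.Set.add [] (xs.filter (fun x => !(acc.contains x))) := by
  cases xs with
  | nil => simp
  | cons x rest =>
    rw [List.foldl_cons, List.filter_cons]
    by_cases h : acc.contains x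
    · rw [show PySem.Set.add acc x = acc from by
        simp only [PySem.Set.add, PySem.Set.contains, h]; rw [if_pos trivial]]
      simp only [h, Bool.not_true]
      rw [if_neg (by simp)]
      exact foldl_add_split rest acc
    · have hb : acc.contains x = false := by simpa using h
      rw [show PySem.Set.add acc x = acc ++ [x] from by
        simp only [PySem.Set.add, PySem.Set.contains, hb]; rw [if_neg (by simp)]]
      simp only [hb, Bool.not_false]
      rw [if_pos trivial, List.foldl_cons,
          show PySem.Set.add ([] : List α) x = [x] from by
            simp [PySem.Set.add, PySem.Set.contains],
          foldl_add_split rest (acc ++ [x]),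
          foldl_add_split (rest.filter (fun y => !(acc.contains y))) [x],
          List.append_assoc]
      congr 2
      rw [List.filter_filter]
      congr 1
      apply List.filter_congr
      intro y _
      simp only [List.contains_append, Bool.not_or, List.contains_cons, List.contains_nil,
        Bool.or_false]
      rw [Bool.and_comm]
termination_by xs.length
decreasing_by
  · simp
  · simp
  · have h2 := List.length_filter_le (fun y => !decide (y ∈ acc)) rest
    simp
    omega

-- peeling the first kept clean term off the dedup, folding it into the seen-filter
theorem ofList_cons_split (seen : PySem.Set String) (c : String) (L : List String)
    (hnotin : seen.contains c = false) :
    PySem.Set.ofList (c :: L.filter (fun x => !(x == "") && !(seen.contains x)))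
      = c :: PySem.Set.ofList (L.filter (fun x => !(x == "") && !((seen.add c).contains x))) := by
  rw [PySem.Set.ofList, List.foldl_cons,
      show PySem.Set.add PySem.Set.empty c = [c] from by
        simp [PySem.Set.add, PySem.Set.contains, PySem.Set.empty],
      foldl_add_split (L.filter (fun x => !(x == "") && !(seen.contains x))) [c]]
  rw [PySem.Set.ofList, List.singleton_append]
  congr 1
  rw [List.filter_filter]
  congr 1
  apply List.filter_congr
  intro y _
  have : (seen.add c).contains y = (seen.contains y || y == c) := by
    simp only [PySem.Set.add, PySem.Set.contains]
    rw [if_neg (by simpa using hnotin)]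
    simp only [List.contains_append, List.contains_cons, List.contains_nil, Bool.or_false]
  rw [this]
  simp only [List.contains_cons, List.contains_nil, Bool.or_false, Bool.not_or]
  cases hy1 : (y == "") <;> cases hy2 : seen.contains y <;> cases hy3 : (y == c) <;> rfl

-- the A-loop invariant: while the cap is not reached, the loop returns the accumulator
-- followed by the capped dedup of the not-yet-seen non-empty cleaned terms
theorem truncateTermsLoop_eq (terms : List String) (seen : PySem.Set String) (ded : List String)
    (h : ded.length < 4096) :
    truncateTermsLoop terms seen ded
      = ded ++ (PySem.Set.ofList ((terms.map (fun t => PySem.Str.lower (PySem.Str.strip t))).filter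
          (fun c => !(c == "") && !(seen.contains c)))).take (4096 - ded.length) := by
  induction terms generalizing seen ded with
  | nil => simp [truncateTermsLoop, PySem.Set.ofList]
  | cons term rest ih =>
    simp only [truncateTermsLoop]
    set c := PySem.Str.lower (PySem.Str.strip term) with hc
    clear_value c
    by_cases hskip : (c == "" || seen.contains c) = true
    · rw [if_pos hskip, ih seen ded h]
      have hfilter : List.filter (fun x => !(x == "") && !(seen.contains x))
            (List.map (fun t => PySem.Str.lower (PySem.Str.strip t)) (term :: rest))
          = List.filter (fun x => !(x == "") && !(seen.contains x))
            (List.map (fun t => PySem.Str.lower (PySem.Str.strip t)) rest) := by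
        rw [List.map_cons, List.filter_cons, ← hc]
        simp only [Bool.or_eq_true] at hskip
        rcases hskip with h1 | h1
        · simp [h1]
        · have hmem : c ∈ seen := by simpa using h1
          simp [hmem]
      rw [hfilter]
    · rw [if_neg hskip]
      simp only [Bool.or_eq_true, not_or, Bool.not_eq_true] at hskip
      obtain ⟨hne, hnotin⟩ := hskip
      have hfilter : List.filter (fun x => !(x == "") && !(seen.contains x))
            (List.map (fun t => PySem.Str.lower (PySem.Str.strip t)) (term :: rest))
          = c :: List.filter (fun x => !(x == "") && !(seen.contains x))
            (List.map (fun t => PySem.Str.lower (PySem.Str.strip t)) rest) := by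
        rw [List.map_cons, List.filter_cons, ← hc]
        have hmem : c ∉ seen := by simpa using hnotin
        simp [hne, hmem]
      have hded := ofList_cons_split seen c
        (rest.map (fun t => PySem.Str.lower (PySem.Str.strip t))) hnotin
      rw [hfilter, hded]
      by_cases hcap : 4096 ≤ (ded ++ [c]).length
      · rw [if_pos hcap]
        have hlen : 4096 - ded.length = 1 := by simp at hcap; omega
        rw [hlen]
        simp
      · rw [if_neg hcap]
        simp only [List.length_append, List.length_cons, List.length_nil] at hcap
        rw [ih (seen.add c) (ded ++ [c]) (by simp; omega)]
        have ht : 4096 - ded.length = (4096 - (ded ++ [c]).length) + 1 := by simp; omega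
        rw [ht, List.take_succ_cons, List.append_assoc]
        simp

-- Dict.contains through the key list (Bool form of contains_iff_mem_keys)
theorem dict_contains_eq_keys_contains (d : PySem.Dict String Int) (k : String) :
    d.contains k = PySem.Set.contains d.keys k := by
  by_cases h : d.contains k = true
  · rw [h]; symm
    simpa [PySem.Set.contains] using (PySem.Dict.contains_iff_mem_keys d k).mp h
  · have hf : d.contains k = false := by simpa using h
    rw [hf]; symm
    simp only [PySem.Set.contains, List.contains_eq_mem, decide_eq_false_iff_not]
    intro hm
    exact h ((PySem.Dict.contains_iff_mem_keys d k).mpr hm)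

-- buildFirst never changes an existing entry
theorem buildFirst_get?_of_some (l : List String) (d : PySem.Dict String Int) (n : Int)
    (k : String) (v : Int) (h : d.get? k = some v) :
    (buildFirst d l n).get? k = some v := by
  induction l generalizing d n with
  | nil => simpa [buildFirst, PySem.List.enumerate_nil] using h
  | cons x rest ih =>
    rw [show buildFirst d (x :: rest) n
        = buildFirst (if x == "" then d else d.setdefault x n) rest (n + 1) from by
      simp [buildFirst, PySem.List.enumerate_cons]]
    by_cases hx : (x == "") = true
    · rw [if_pos hx]; exact ih d (n + 1) h
    · rw [if_neg hx]
      by_cases hc : d.contains x = true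
      · rw [PySem.Dict.setdefault_of_contains d n hc]; exact ih d (n + 1) h
      · have hcf : d.contains x = false := by simpa using hc
        rw [PySem.Dict.setdefault_of_not_contains d n hcf]
        have hkx : k ≠ x := by
          intro he
          rw [he, (PySem.Dict.get?_eq_none_iff_contains d x).mpr hcf] at h
          cases h
        exact ih (d.insert x n) (n + 1) (by rw [PySem.Dict.get?_insert_of_ne d n hkx]; exact h)

-- the B-side invariant: the first-occurrence filter over enumerate, with the final dict grown
-- from d at indices >= n, selects exactly the ordered dedup of the terms not already keyed in d
theorem keepFilter_eq (l : List String) (d : PySem.Dict String Int) (n : Int)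
    (hv : ∀ k v, d.get? k = some v → v < n) :
    ((PySem.List.enumerate l n).filter
        (fun p => !(p.2 == "") && ((buildFirst d l n).get? p.2 == some p.1))).map (fun p => p.2)
      = PySem.Set.ofList (l.filter (fun x => !(x == "") && !(PySem.Set.contains d.keys x))) := by
  induction l generalizing d n with
  | nil => simp [buildFirst, PySem.List.enumerate_nil, PySem.Set.ofList]
  | cons x rest ih =>
    have hbuild : buildFirst d (x :: rest) n
        = buildFirst (if x == "" then d else d.setdefault x n) rest (n + 1) := by
      simp [buildFirst, PySem.List.enumerate_cons]
    rw [PySem.List.enumerate_cons, List.filter_cons, hbuild]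
    by_cases hx : (x == "") = true
    · rw [if_pos hx] at hbuild ⊢
      have hcond : ¬((!((n, x).2 == "")
          && ((buildFirst d rest (n + 1)).get? (n, x).2 == some (n, x).1)) = true) := by
        simp [hx]
      rw [if_neg hcond, List.filter_cons,
        if_neg (show ¬((!(x == "") && !(PySem.Set.contains d.keys x)) = true) from by simp [hx])]
      exact ih d (n + 1) (fun k v h => lt_trans (hv k v h) (by omega))
    · have hxf : (x == "") = false := by simpa using hx
      rw [if_neg hx] at hbuild ⊢
      by_cases hc : d.contains x = true
      · -- already seen before index n: its recorded index is < n, head dropped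
        rw [PySem.Dict.setdefault_of_contains d n hc] at hbuild ⊢
        have hsome : (d.get? x).isSome = true := by
          rw [← PySem.Dict.contains_eq_isSome_get? d x]; exact hc
        obtain ⟨v, hvx⟩ := Option.isSome_iff_exists.mp hsome
        have hget : (buildFirst d rest (n + 1)).get? x = some v :=
          buildFirst_get?_of_some rest d (n + 1) x v hvx
        have hvn : v < n := hv x v hvx
        have hcond : ¬((!((n, x).2 == "")
            && ((buildFirst d rest (n + 1)).get? (n, x).2 == some (n, x).1)) = true) := by
          simp [hxf, hget]
          omega
        have hmem : x ∈ d.keys := (PySem.Dict.contains_iff_mem_keys d x).mp hc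
        rw [if_neg hcond, List.filter_cons, if_neg (by simp [PySem.Set.contains, hmem])]
        exact ih d (n + 1) (fun k v h => lt_trans (hv k v h) (by omega))
      · -- first occurrence: recorded index is n, head kept
        have hcf : d.contains x = false := by simpa using hc
        rw [PySem.Dict.setdefault_of_not_contains d n hcf] at hbuild ⊢
        have hget : (buildFirst (d.insert x n) rest (n + 1)).get? x = some n :=
          buildFirst_get?_of_some rest (d.insert x n) (n + 1) x n
            (PySem.Dict.get?_insert_self d x n)
        have hcond : (!((n, x).2 == "")
            && ((buildFirst (d.insert x n) rest (n + 1)).get? (n, x).2 == some (n, x).1)) = true := by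
          simp [hxf, hget]
        have hnmem : x ∉ d.keys := fun hm => by
          rw [(PySem.Dict.contains_iff_mem_keys d x).mpr hm] at hcf; cases hcf
        have hkeysnotin : PySem.Set.contains d.keys x = false := by
          rw [← dict_contains_eq_keys_contains]; exact hcf
        rw [if_pos hcond, List.map_cons, List.filter_cons,
          if_pos (by simp [PySem.Set.contains, hxf, hnmem])]
        rw [ofList_cons_split d.keys x rest hkeysnotin]
        congr 1
        have hkeys : (d.insert x n).keys = PySem.Set.add d.keys x := by
          rw [PySem.Dict.keys_insert_of_not_contains d n hcf]
          simp [PySem.Set.add, PySem.Set.contains, hnmem]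
        have hrec := ih (d.insert x n) (n + 1) (fun k v h => by
          by_cases hkx : k = x
          · rw [hkx, PySem.Dict.get?_insert_self d x n] at h
            injection h with h2
            omega
          · rw [PySem.Dict.get?_insert_of_ne d n hkx] at h
            have := hv k v h; omega)
        rw [hrec, hkeys]

-- ===== VERDICT (by name: the statement is the Claim_ definition above) =====
theorem truncate_terms_py_spec : Claim_equal_truncate_terms_py := by
  intro terms _
  unfold Spec_truncate_terms_py truncate_terms_py truncate_terms_py_alt
  rw [truncateTermsLoop_eq terms PySem.Set.empty [] (by simp)]
  simp only [List.nil_append]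
  rw [keepFilter_eq (terms.map (fun t => PySem.Str.lower (PySem.Str.strip t)))
      PySem.Dict.empty 0 (fun k v h => by simp [PySem.Dict.get?_empty] at h)]
  rw [PySem.List.slice_to _ (by norm_num)]
  rw [show Int.toNat 4096 = 4096 from rfl]
  have : (PySem.Dict.empty : PySem.Dict String Int).keys = [] := by
    simp [PySem.Dict.keys_empty]
  rw [this]
  simp [PySem.Set.empty, PySem.Set.contains]
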